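-- pv_equiv track=rewrite | github.com/AnotherTrojan/101test2 | q5.py | get_two_highest_marks
-- ===== SOURCE A (Python) =====
-- def get_two_highest_marks(names_marks_list):
--     first_mark = 0
--     second_mark = 0
--     for i in names_marks_list:
--         if i[1] > first_mark:
--             second_mark = first_mark
--             first_mark = i[1]
--         elif i[1] > second_mark:
--             second_mark = i[1]
--
--     to_return = [second_mark, first_mark]
--     to_return.sort()
--     return to_return
-- ===== SOURCE B (Python) =====
-- def get_two_highest_marks(names_marks_list):
--     marks = sorted([0, 0] + [i[1] for i in names_marks_list])
--     return marks[-2:]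
-- ===== Notes on version B (the rewrite author's own statement) =====
-- stated objective: simpler
-- what changed: Replaces the streaming two-maximum scan (two running variables updated per element, then a final two-element sort) with a single expression: collect the marks, prepend the two zero sentinels that A's initialization implies, sort ascending, and take the last two elements.
import Mathlib
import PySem

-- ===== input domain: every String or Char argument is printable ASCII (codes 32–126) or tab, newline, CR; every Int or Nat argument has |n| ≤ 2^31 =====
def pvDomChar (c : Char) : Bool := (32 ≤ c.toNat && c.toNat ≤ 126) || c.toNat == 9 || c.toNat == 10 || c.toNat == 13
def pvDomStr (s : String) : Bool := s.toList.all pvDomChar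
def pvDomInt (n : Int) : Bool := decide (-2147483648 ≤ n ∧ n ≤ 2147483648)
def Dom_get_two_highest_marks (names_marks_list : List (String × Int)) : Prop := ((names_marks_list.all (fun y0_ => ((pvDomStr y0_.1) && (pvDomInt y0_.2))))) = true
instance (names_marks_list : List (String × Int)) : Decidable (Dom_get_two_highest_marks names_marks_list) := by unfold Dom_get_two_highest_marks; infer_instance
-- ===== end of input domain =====

-- B replaces A's streaming two-maximum scan by "sort the marks (with A's two zero sentinels) ascending and take the last two": simpler, one expression.

-- ===== PORT A =====
def get_two_highest_marks (names_marks_list : List (String × Int)) : List Int :=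
  -- first_mark = 0; second_mark = 0; for i in names_marks_list: ...
  let fs := names_marks_list.foldl
    (fun (fs : Int × Int) i =>
      if i.2 > fs.1 then (i.2, fs.1)
      else if i.2 > fs.2 then (fs.1, i.2)
      else fs) (0, 0)
  -- to_return = [second_mark, first_mark]; to_return.sort(); return to_return
  PySem.List.sorted [fs.2, fs.1] (fun x => x) false

-- ===== PORT B =====
def get_two_highest_marks_alt (names_marks_list : List (String × Int)) : List Int :=
  -- marks = sorted([0, 0] + [i[1] for i in names_marks_list]); return marks[-2:]
  let marks := PySem.List.sorted ([0, 0] ++ names_marks_list.map (fun i => i.2)) (fun x => x) false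
  PySem.List.slice marks (some (-2)) none

-- ===== PRECONDITION & SPEC =====
def Spec_get_two_highest_marks (names_marks_list : List (String × Int)) (out : List Int) : Prop := out = get_two_highest_marks_alt names_marks_list
instance (names_marks_list : List (String × Int)) (out : List Int) : Decidable (Spec_get_two_highest_marks names_marks_list out) := by unfold Spec_get_two_highest_marks; infer_instance

-- ===== CLAIM (what is proved, stated in full; the proofs are below) =====
def Claim_equal_get_two_highest_marks : Prop := ∀ (names_marks_list : List (String × Int)), Dom_get_two_highest_marks names_marks_list → Spec_get_two_highest_marks names_marks_list (get_two_highest_marks names_marks_list)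

-- ===== LEMMAS AND PROOFS =====

-- A's loop step on a single mark
def pvStep (fs : Int × Int) (x : Int) : Int × Int :=
  if x > fs.1 then (x, fs.1)
  else if x > fs.2 then (fs.1, x)
  else fs

-- one ordered insertion (the step of PySem.List.sorted's insertion sort, identity key)
def pvIns (acc : List Int) (x : Int) : List Int :=
  PySem.List.insertBy (fun a b => decide (a < b)) x acc

theorem pvIns_append_not (x : Int) (u r : List Int) (h : ∀ y ∈ u, ¬ x < y) :
    PySem.List.insertBy (fun a b => decide (a < b)) x (u ++ r)
      = u ++ PySem.List.insertBy (fun a b => decide (a < b)) x r := by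
  induction u with
  | nil => simp
  | cons a u ih =>
    have ha : ¬ x < a := h a (by simp)
    simp only [List.cons_append, PySem.List.insertBy, decide_eq_true_eq]
    rw [if_neg ha, ih (fun y hy => h y (by simp [hy]))]

theorem pvIns_le (u : List Int) (s f x : Int) (hsf : s ≤ f) (hx : x ≤ s)
    (hu : ∀ a ∈ u, a ≤ s) :
    ∃ v, pvIns (u ++ [s, f]) x = v ++ [s, f] ∧ ∀ a ∈ v, a ≤ s := by
  induction u with
  | nil =>
    by_cases h1 : x < s
    · exact ⟨[x], by simp [pvIns, PySem.List.insertBy, h1], by simpa using le_of_lt h1⟩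
    · have hxs : x = s := le_antisymm hx (le_of_not_gt h1)
      subst hxs
      by_cases h2 : x < f
      · exact ⟨[x], by simp [pvIns, PySem.List.insertBy, h2], by simp⟩
      · have hxf : x = f := le_antisymm hsf (le_of_not_gt h2)
        subst hxf
        exact ⟨[x], by simp [pvIns, PySem.List.insertBy], by simp⟩
  | cons a u ih =>
    by_cases h1 : x < a
    · refine ⟨x :: a :: u, by simp [pvIns, PySem.List.insertBy, h1], ?_⟩
      intro b hb
      simp only [List.mem_cons] at hb
      rcases hb with rfl | rfl | hb
      · exact hx
      · exact hu _ (by simp)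
      · exact hu b (List.mem_cons_of_mem _ hb)
    · obtain ⟨v, hv, hvle⟩ := ih (fun b hb => hu b (List.mem_cons_of_mem _ hb))
      refine ⟨a :: v, ?_, ?_⟩
      · simpa [pvIns, PySem.List.insertBy, h1] using hv
      · intro b hb
        simp only [List.mem_cons] at hb
        rcases hb with rfl | hb
        · exact hu b (by simp)
        · exact hvle b hb

theorem pvFold_sorted (xs : List Int) : ∀ (u : List Int) (f s : Int), s ≤ f →
    (∀ a ∈ u, a ≤ s) →
    ∃ v, xs.foldl pvIns (u ++ [s, f])
        = v ++ [(xs.foldl pvStep (f, s)).2, (xs.foldl pvStep (f, s)).1]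
      ∧ (xs.foldl pvStep (f, s)).2 ≤ (xs.foldl pvStep (f, s)).1
      ∧ ∀ a ∈ v, a ≤ (xs.foldl pvStep (f, s)).2 := by
  induction xs with
  | nil => intro u f s hsf hu; exact ⟨u, rfl, hsf, hu⟩
  | cons x xs ih =>
    intro u f s hsf hu
    simp only [List.foldl_cons]
    by_cases h1 : x > f
    · have hstep : pvStep (f, s) x = (x, f) := by simp [pvStep, h1]
      have hins : pvIns (u ++ [s, f]) x = (u ++ [s]) ++ [f, x] := by
        have := pvIns_append_not x (u ++ [s, f]) [] (by
          intro y hy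
          rcases List.mem_append.mp hy with hy | hy
          · exact not_lt_of_ge (le_trans (le_trans (hu y hy) hsf) (le_of_lt h1))
          · simp at hy
            rcases hy with rfl | rfl <;> omega)
        simpa [pvIns] using this
      rw [hstep, hins]
      exact ih (u ++ [s]) x f (le_of_lt h1) (by
        intro a ha
        rcases List.mem_append.mp ha with ha | ha
        · exact le_trans (hu a ha) hsf
        · simp at ha; omega)
    · by_cases h2 : x > s
      · have hstep : pvStep (f, s) x = (f, x) := by simp [pvStep, h1, h2]
        have hnot : ∀ y ∈ u ++ [s], ¬ x < y := by
          intro y hy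
          rcases List.mem_append.mp hy with hy | hy
          · exact not_lt_of_ge (le_of_lt (lt_of_le_of_lt (hu y hy) h2))
          · simp at hy; omega
        rw [hstep]
        by_cases h3 : x < f
        · have hins : pvIns (u ++ [s, f]) x = (u ++ [s]) ++ [x, f] := by
            have h4 : (u ++ [s, f]) = (u ++ [s]) ++ [f] := by simp
            rw [pvIns, h4, pvIns_append_not x (u ++ [s]) [f] hnot]
            simp [PySem.List.insertBy, h3]
          rw [hins]
          exact ih (u ++ [s]) f x (le_of_lt h3) (by
            intro a ha
            rcases List.mem_append.mp ha with ha | ha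
            · exact le_of_lt (lt_of_le_of_lt (hu a ha) h2)
            · simp at ha; omega)
        · have hxf : x = f := by omega
          have hins : pvIns (u ++ [s, f]) x = (u ++ [s]) ++ [x, f] := by
            have h4 : (u ++ [s, f]) = (u ++ [s]) ++ [f] := by simp
            rw [pvIns, h4, pvIns_append_not x (u ++ [s]) [f] hnot]
            simp [PySem.List.insertBy, hxf]
          rw [hins]
          exact ih (u ++ [s]) f x (le_of_eq hxf) (by
            intro a ha
            rcases List.mem_append.mp ha with ha | ha
            · exact le_of_lt (lt_of_le_of_lt (hu a ha) h2)
            · simp at ha; omega)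
      · have hstep : pvStep (f, s) x = (f, s) := by simp [pvStep, h1, h2]
        obtain ⟨v0, hv0, hv0le⟩ := pvIns_le u s f x hsf (le_of_not_gt h2) hu
        rw [hstep, hv0]
        exact ih v0 f s hsf hv0le

-- ===== VERDICT (by name: the statement is the Claim_ definition above) =====
theorem get_two_highest_marks_spec : Claim_equal_get_two_highest_marks := by
  unfold Claim_equal_get_two_highest_marks
  intro l _
  unfold Spec_get_two_highest_marks get_two_highest_marks get_two_highest_marks_alt
  have hfold : l.foldl
      (fun (fs : Int × Int) i =>
        if i.2 > fs.1 then (i.2, fs.1)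
        else if i.2 > fs.2 then (fs.1, i.2)
        else fs) (0, 0) = (l.map (fun i => i.2)).foldl pvStep (0, 0) := by
    rw [List.foldl_map]; rfl
  set marks := l.map (fun i => i.2) with hm
  have hsorted : PySem.List.sorted ([0, 0] ++ marks) (fun x => x) false
      = marks.foldl pvIns (([] : List Int) ++ [0, 0]) := by
    rw [PySem.List.sorted_eq_foldl_insertBy]
    rfl
  obtain ⟨v, hv, hle, _⟩ := pvFold_sorted marks [] 0 0 le_rfl (by simp)
  rw [hfold]
  set fs := marks.foldl pvStep (0, 0) with hfs
  have hA : PySem.List.sorted [fs.2, fs.1] (fun x => x) false = [fs.2, fs.1] :=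
    PySem.List.sorted_eq_self_of_pairwise _ _ (by simp [hle])
  have hB : PySem.List.slice (PySem.List.sorted ([0, 0] ++ marks) (fun x => x) false)
      (some (-2)) none = [fs.2, fs.1] := by
    rw [hsorted, hv]
    rw [PySem.List.slice_from_neg_ofNat _ 2 (by omega)]
    have hlen : (v ++ [fs.2, fs.1]).length - 2 = v.length := by simp
    rw [hlen, List.drop_left]
  simp only [hA, hB]
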